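-- pv_equiv track=rewrite | github.com/Meta-optimization/L2L | l2l/optimizees/clustering/helpers.py | get_labels_from_sample
-- ===== SOURCE A (Python) =====
-- def get_labels_from_sample(sample, num_points, num_clusters):
--     y = [-1] * num_points
--     for i in range(num_points):
--         for c in range(num_clusters):
--             var_name = f"x_{i}_{c}"
--             if sample.get(var_name, 0) == 1:
--                 y[i] = c
--                 break
--     return y
-- ===== SOURCE B (Python) =====
-- def get_labels_from_sample(sample, num_points, num_clusters):
--     """Decode per-point cluster labels by a single pass over the sample,
--     routed through a prebuilt variable-name index; the smallest matching
--     cluster wins for each point."""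
--     index = {f"x_{i}_{c}": (i, c)
--              for i in range(num_points) for c in range(num_clusters)}
--     y = [-1] * num_points
--     for name, value in sample.items():
--         if value == 1 and name in index:
--             i, c = index[name]
--             if y[i] == -1 or c < y[i]:
--                 y[i] = c
--     return y
-- ===== Notes on version B (the rewrite author's own statement) =====
-- stated objective: alternative
-- what changed: Instead of probing the dict for every candidate name with a nested loop and an inner break, B builds a name->(point,cluster) index once and makes a single pass over the sample's items, keeping the smallest matching cluster per point; Pre_ only excludes association lists with duplicate keys, which cannot arise from A's dict parameter.
import Mathlib
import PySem

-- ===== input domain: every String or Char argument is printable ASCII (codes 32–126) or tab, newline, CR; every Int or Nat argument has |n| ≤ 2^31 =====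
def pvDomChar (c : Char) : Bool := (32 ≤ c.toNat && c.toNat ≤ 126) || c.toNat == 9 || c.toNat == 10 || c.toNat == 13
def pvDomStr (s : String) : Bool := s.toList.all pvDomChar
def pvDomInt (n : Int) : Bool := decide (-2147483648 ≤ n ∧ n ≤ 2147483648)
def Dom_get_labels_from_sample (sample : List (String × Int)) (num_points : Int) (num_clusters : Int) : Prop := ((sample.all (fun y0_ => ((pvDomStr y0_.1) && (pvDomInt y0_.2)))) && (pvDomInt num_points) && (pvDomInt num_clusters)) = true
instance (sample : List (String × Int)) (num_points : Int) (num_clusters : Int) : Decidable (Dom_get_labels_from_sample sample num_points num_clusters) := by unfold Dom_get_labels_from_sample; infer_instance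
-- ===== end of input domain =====

-- B replaces A's per-point nested probing of the dict (with an inner break) by a prebuilt
-- name → (point, cluster) index and one pass over the sample keeping the smallest cluster
-- per point; return values proved equal on key-Nodup samples.

-- ===== PORT A =====

-- f"x_{i}_{c}" built at the character level (exact: str(i) = PySem.Int.toChars i)
def pvKey (i c : Int) : String :=
  String.ofList ('x' :: '_' :: PySem.Int.toChars i ++ '_' :: PySem.Int.toChars c)

-- the inner 'for c in range(num_clusters): … break' loop of A
def pvInnerA (sample : PySem.Dict String Int) (y : List Int) (i : Int) : List Int → List Int
  | [] => y
  | c :: rest =>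
      if sample.getD (pvKey i c) 0 == 1 then PySem.List.pySetD y i c
      else pvInnerA sample y i rest

def get_labels_from_sample (sample : List (String × Int)) (num_points : Int) (num_clusters : Int) : List Int :=
  (PySem.List.pyRange 0 num_points 1).foldl
    (fun y i => pvInnerA (PySem.Dict.mk sample) y i (PySem.List.pyRange 0 num_clusters 1))
    (List.replicate num_points.toNat (-1))

-- ===== PORT B =====

-- the pairs of Source B's dict comprehension, in comprehension order
def pvPairs (np nc : Int) : List (String × (Int × Int)) :=
  (PySem.List.pyRange 0 np 1).flatMap
    (fun i => (PySem.List.pyRange 0 nc 1).map (fun c => (pvKey i c, (i, c))))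

-- the dict comprehension of Source B: {f"x_{i}_{c}": (i, c) for i … for c …};
-- its keys are pairwise distinct (pvIndex_keys_nodup below), so the dict IS its pair list
def pvIndex (num_points num_clusters : Int) : PySem.Dict String (Int × Int) :=
  PySem.Dict.mk (pvPairs num_points num_clusters)

-- the body of Source B's pass over sample.items() ('name in index' + 'index[name]' = match on get?)
def pvStepB (idx : PySem.Dict String (Int × Int)) (y : List Int) (kv : String × Int) : List Int :=
  if kv.2 == 1 then
    match idx.get? kv.1 with
    | some (i, c) =>
        if (PySem.List.pyGetD y i 0 == -1 || decide (c < PySem.List.pyGetD y i 0)) = true then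
          PySem.List.pySetD y i c
        else y
    | none => y
  else y

def get_labels_from_sample_alt (sample : List (String × Int)) (num_points : Int) (num_clusters : Int) : List Int :=
  sample.foldl (pvStepB (pvIndex num_points num_clusters)) (List.replicate num_points.toNat (-1))

-- ===== PRECONDITION & SPEC =====
-- Pre_ excludes association lists with duplicate keys: they do not arise from a Python
-- dict (A's parameter), and first-match lookup vs. scanning all items is ambiguous there.
def Pre_get_labels_from_sample (sample : List (String × Int)) (num_points : Int) (num_clusters : Int) : Prop :=
  (sample.map Prod.fst).Nodup
instance (sample : List (String × Int)) (num_points : Int) (num_clusters : Int) : Decidable (Pre_get_labels_from_sample sample num_points num_clusters) := by unfold Pre_get_labels_from_sample; infer_instance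
def pvWitness_get_labels_from_sample : (List (String × Int)) × Int × Int := ([("x_0_1", 1), ("x_1_0", 2)], 2, 2)

def Spec_get_labels_from_sample (sample : List (String × Int)) (num_points : Int) (num_clusters : Int) (out : List Int) : Prop := out = get_labels_from_sample_alt sample num_points num_clusters
instance (sample : List (String × Int)) (num_points : Int) (num_clusters : Int) (out : List Int) : Decidable (Spec_get_labels_from_sample sample num_points num_clusters out) := by unfold Spec_get_labels_from_sample; infer_instance

-- ===== CLAIM (what is proved, stated in full; the proofs are below) =====
def Claim_equal_get_labels_from_sample : Prop := ∀ (sample : List (String × Int)) (num_points : Int) (num_clusters : Int), Dom_get_labels_from_sample sample num_points num_clusters → Pre_get_labels_from_sample sample num_points num_clusters → Spec_get_labels_from_sample sample num_points num_clusters (get_labels_from_sample sample num_points num_clusters)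

-- ===== LEMMAS AND PROOFS =====

-- ---- decimal digits ----
def pvDigits (n : Nat) : List Char :=
  if h : n < 10 then [Nat.digitChar n]
  else pvDigits (n / 10) ++ [Nat.digitChar (n % 10)]
  decreasing_by exact Nat.div_lt_self (by omega) (by omega)

lemma pvToDigitsCore_eq (f : Nat) : ∀ n acc, n < f →
    Nat.toDigitsCore 10 f n acc = pvDigits n ++ acc := by
  induction f with
  | zero => intro n acc h; omega
  | succ f ih =>
    intro n acc h
    rw [Nat.toDigitsCore]
    by_cases h10 : n < 10
    · have hz : n / 10 = 0 := Nat.div_eq_of_lt h10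
      rw [pvDigits]
      simp [hz, h10, Nat.mod_eq_of_lt h10]
    · have hz : ¬ n / 10 = 0 := by
        intro hh; exact h10 (by omega)
      rw [pvDigits]
      have hlt : n / 10 < f := by
        have := Nat.div_lt_self (by omega : 0 < n) (by omega : 1 < 10)
        omega
      simp [hz, h10, ih (n / 10) _ hlt]

lemma pvToDigits_eq (n : Nat) : Nat.toDigits 10 n = pvDigits n := by
  rw [Nat.toDigits, pvToDigitsCore_eq (n + 1) n [] (by omega), List.append_nil]

lemma pvDigitChar_bounds {d : Nat} (h : d < 10) :
    48 ≤ (Nat.digitChar d).toNat ∧ (Nat.digitChar d).toNat ≤ 57 := by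
  interval_cases d <;> decide

lemma pvDigits_bounds (n : Nat) : ∀ c ∈ pvDigits n, 48 ≤ c.toNat ∧ c.toNat ≤ 57 := by
  induction n using Nat.strong_induction_on with
  | _ n ih =>
    intro c hc
    rw [pvDigits] at hc
    by_cases h : n < 10
    · rw [dif_pos h] at hc
      rw [List.mem_singleton] at hc
      subst hc; exact pvDigitChar_bounds h
    · rw [dif_neg h] at hc
      rw [List.mem_append, List.mem_singleton] at hc
      rcases hc with hc | hc
      · exact ih (n / 10) (Nat.div_lt_self (by omega) (by omega)) c hc
      · subst hc; exact pvDigitChar_bounds (Nat.mod_lt _ (by omega))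

def pvVal (ds : List Char) : Nat := ds.foldl (fun a c => 10 * a + (c.toNat - 48)) 0

lemma pvVal_pvDigits (n : Nat) : pvVal (pvDigits n) = n := by
  induction n using Nat.strong_induction_on with
  | _ n ih =>
    rw [pvDigits]
    by_cases h : n < 10
    · rw [dif_pos h]
      unfold pvVal
      simp only [List.foldl_cons, List.foldl_nil]
      interval_cases n <;> decide
    · rw [dif_neg h]
      unfold pvVal
      rw [List.foldl_append]
      have hv := ih (n / 10) (Nat.div_lt_self (by omega) (by omega))
      unfold pvVal at hv
      rw [hv]
      simp only [List.foldl_cons, List.foldl_nil]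
      have h10 : n % 10 < 10 := Nat.mod_lt _ (by omega)
      have : (n % 10).digitChar.toNat - 48 = n % 10 := by
        interval_cases hm : n % 10 <;> decide
      omega

lemma pvToChars_nonneg {n : Int} (h : 0 ≤ n) : PySem.Int.toChars n = pvDigits n.toNat := by
  rw [PySem.Int.toChars, if_neg (by omega), pvToDigits_eq]

lemma pvToChars_no_underscore {n : Int} (h : 0 ≤ n) : ∀ c ∈ PySem.Int.toChars n, c ≠ '_' := by
  rw [pvToChars_nonneg h]
  intro c hc
  have hb := pvDigits_bounds n.toNat c hc
  intro he; subst he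
  have : ('_').toNat = 95 := by decide
  omega

-- ---- splitting on '_' ----
def pvSplit1 : List Char → List Char → List (List Char)
  | cur, [] => [cur.reverse]
  | cur, ch :: rest => if ch = '_' then cur.reverse :: pvSplit1 [] rest else pvSplit1 (ch :: cur) rest

lemma pvGo_spec : ∀ (fuel : Nat) (l cur : List Char) (acc : List (List Char)),
    l.length < fuel →
    PySem.Chars.splitOn.go ['_'] fuel l cur acc = acc.reverse ++ pvSplit1 cur l := by
  intro fuel
  induction fuel with
  | zero => intro l cur acc h; omega
  | succ fuel ih =>
    intro l cur acc h
    cases l with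
    | nil =>
      rw [PySem.Chars.splitOn.go]
      simp [pvSplit1]
      omega
    | cons ch rest =>
      rw [PySem.Chars.splitOn.go]
      by_cases hc : ch = '_'
      · subst hc
        have hpre : List.isPrefixOf ['_'] ('_' :: rest) = true := by simp [List.isPrefixOf]
        simp only [hpre, if_pos]
        have hd : List.drop (['_'] : List Char).length ('_' :: rest) = rest := rfl
        rw [hd, ih rest [] _ (by simpa using h)]
        simp [pvSplit1]
      · have hpre : List.isPrefixOf ['_'] (ch :: rest) = false := by
          simp [List.isPrefixOf, hc]
          intro hh; exact absurd hh.symm hc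
        simp only [hpre, Bool.false_eq_true, if_false]
        rw [ih rest (ch :: cur) acc (by simpa using h)]
        simp [pvSplit1, hc]

lemma pvSplitOn_eq (s : List Char) : PySem.Chars.splitOn s ['_'] = pvSplit1 [] s := by
  show PySem.Chars.splitOn.go ['_'] (s.length + 1) s [] [] = pvSplit1 [] s
  rw [pvGo_spec (s.length + 1) s [] [] (by omega)]
  rfl

lemma pvSplit1_no_sep (D : List Char) (h : ∀ ch ∈ D, ch ≠ '_') :
    ∀ cur, pvSplit1 cur D = [cur.reverse ++ D] := by
  induction D with
  | nil => intro cur; simp [pvSplit1]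
  | cons ch rest ih =>
    intro cur
    rw [pvSplit1, if_neg (h ch List.mem_cons_self)]
    rw [ih (fun c hc => h c (List.mem_cons_of_mem _ hc)) (ch :: cur)]
    simp

lemma pvSplit1_sep (D t : List Char) (h : ∀ ch ∈ D, ch ≠ '_') :
    ∀ cur, pvSplit1 cur (D ++ '_' :: t) = (cur.reverse ++ D) :: pvSplit1 [] t := by
  induction D with
  | nil => intro cur; simp [pvSplit1]
  | cons ch rest ih =>
    intro cur
    rw [List.cons_append, pvSplit1, if_neg (h ch List.mem_cons_self)]
    rw [ih (fun c hc => h c (List.mem_cons_of_mem _ hc)) (ch :: cur)]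
    simp

lemma pvSplit_key {i c : Int} (hi : 0 ≤ i) (hc : 0 ≤ c) :
    PySem.Chars.splitOn (pvKey i c).toList ['_']
      = [['x'], PySem.Int.toChars i, PySem.Int.toChars c] := by
  have htl : (pvKey i c).toList = 'x' :: '_' :: PySem.Int.toChars i ++ '_' :: PySem.Int.toChars c := by
    simp [pvKey]
  rw [htl, pvSplitOn_eq]
  have h0 : ('x' :: '_' :: PySem.Int.toChars i ++ '_' :: PySem.Int.toChars c : List Char)
      = ['x'] ++ '_' :: (PySem.Int.toChars i ++ '_' :: PySem.Int.toChars c) := by simp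
  rw [h0, pvSplit1_sep ['x'] _ (by
    intro ch hch
    rw [List.mem_singleton] at hch
    subst hch
    decide) []]
  rw [pvSplit1_sep _ _ (pvToChars_no_underscore hi) []]
  rw [pvSplit1_no_sep _ (pvToChars_no_underscore hc) []]
  simp

-- ---- injectivity of the key builder ----
lemma pvKey_inj {i c i' c' : Int} (hi : 0 ≤ i) (hc : 0 ≤ c) (hi' : 0 ≤ i') (hc' : 0 ≤ c')
    (h : pvKey i c = pvKey i' c') : i = i' ∧ c = c' := by
  have h2 := congrArg (fun s => PySem.Chars.splitOn s.toList ['_']) h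
  simp only [pvSplit_key hi hc, pvSplit_key hi' hc'] at h2
  obtain ⟨hci, hcc⟩ : PySem.Int.toChars i = PySem.Int.toChars i' ∧
      PySem.Int.toChars c = PySem.Int.toChars c' := by
    simpa using h2
  rw [pvToChars_nonneg hi, pvToChars_nonneg hi'] at hci
  rw [pvToChars_nonneg hc, pvToChars_nonneg hc'] at hcc
  have h3 := congrArg pvVal hci
  have h4 := congrArg pvVal hcc
  rw [pvVal_pvDigits, pvVal_pvDigits] at h3 h4
  omega

-- ---- characterisation of A ----
def pvLabel (sample : List (String × Int)) (nc : Int) (i : Int) : Int :=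
  match (PySem.List.pyRange 0 nc 1).find? (fun c => (PySem.Dict.mk sample).getD (pvKey i c) 0 == 1) with
  | some c => c
  | none => -1

lemma pvInnerA_eq (d : PySem.Dict String Int) (i : Int) :
    ∀ (cs : List Int) (y : List Int),
      pvInnerA d y i cs =
        match cs.find? (fun c => d.getD (pvKey i c) 0 == 1) with
        | some c => PySem.List.pySetD y i c
        | none => y := by
  intro cs
  induction cs with
  | nil => intro y; rfl
  | cons c rest ih =>
    intro y
    rw [pvInnerA, List.find?_cons]
    by_cases h : d.getD (pvKey i c) 0 == 1
    · simp [h]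
    · simp only [h, Bool.false_eq_true, if_false]
      exact ih y

lemma pvInnerA_some {d : PySem.Dict String Int} {i c : Int} {cs : List Int} (y : List Int)
    (hf : cs.find? (fun c => d.getD (pvKey i c) 0 == 1) = some c) :
    pvInnerA d y i cs = PySem.List.pySetD y i c := by
  rw [pvInnerA_eq, hf]

lemma pvInnerA_none {d : PySem.Dict String Int} {i : Int} {cs : List Int} (y : List Int)
    (hf : cs.find? (fun c => d.getD (pvKey i c) 0 == 1) = none) :
    pvInnerA d y i cs = y := by
  rw [pvInnerA_eq, hf]

lemma pvLabel_some {sample : List (String × Int)} {nc i c : Int}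
    (hf : (PySem.List.pyRange 0 nc 1).find? (fun c => (PySem.Dict.mk sample).getD (pvKey i c) 0 == 1) = some c) :
    pvLabel sample nc i = c := by
  unfold pvLabel; rw [hf]

lemma pvLabel_none {sample : List (String × Int)} {nc i : Int}
    (hf : (PySem.List.pyRange 0 nc 1).find? (fun c => (PySem.Dict.mk sample).getD (pvKey i c) 0 == 1) = none) :
    pvLabel sample nc i = -1 := by
  unfold pvLabel; rw [hf]

lemma pvA_fold (sample : List (String × Int)) (nc : Int) (n : Nat) :
    ∀ (b : Nat), b ≤ n →
      (PySem.List.pyRange 0 (b : Int) 1).foldl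
          (fun y i => pvInnerA (PySem.Dict.mk sample) y i (PySem.List.pyRange 0 nc 1))
          (List.replicate n (-1))
        = (List.range b).map (fun k : Nat => pvLabel sample nc (k : Int))
            ++ List.replicate (n - b) (-1) := by
  intro b
  induction b with
  | zero =>
    intro _
    rw [Nat.cast_zero, PySem.List.pyRange_one_eq_nil (le_refl 0)]
    simp
  | succ b ih =>
    intro hb
    have hcast : ((b + 1 : Nat) : Int) = (b : Int) + 1 := by push_cast; ring
    rw [hcast, PySem.List.pyRange_one_succ_right (by exact_mod_cast Nat.zero_le b),
      List.foldl_append]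
    rw [ih (by omega)]
    simp only [List.foldl_cons, List.foldl_nil]
    have hlen : ((List.range b).map (fun k : Nat => pvLabel sample nc (k : Int))).length = b := by
      simp
    have hrep : List.replicate (n - b) (-1 : Int) = (-1 : Int) :: List.replicate (n - (b + 1)) (-1) := by
      have h2 : n - b = (n - (b + 1)) + 1 := by omega
      rw [h2, List.replicate_succ]
    rw [List.range_succ, List.map_append, List.map_singleton]
    cases hf : (PySem.List.pyRange 0 nc 1).find?
        (fun c => (PySem.Dict.mk sample).getD (pvKey (b : Int) c) 0 == 1) with
    | none =>
      rw [pvInnerA_none _ hf, pvLabel_none hf, hrep, List.append_cons]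
    | some c =>
      rw [pvInnerA_some _ hf, pvLabel_some hf]
      rw [PySem.List.pySetD_natCast, hrep]
      rw [List.set_append_right _ _ (le_of_eq hlen)]
      rw [hlen, Nat.sub_self, List.set_cons_zero, List.append_cons]

lemma pvA_char (sample : List (String × Int)) (np nc : Int) :
    get_labels_from_sample sample np nc =
      (List.range np.toNat).map (fun k : Nat => pvLabel sample nc (k : Int)) := by
  unfold get_labels_from_sample
  by_cases h : 0 ≤ np
  · obtain ⟨m, rfl⟩ : ∃ m : Nat, np = (m : Int) := ⟨np.toNat, by omega⟩
    simp only [Int.toNat_natCast]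
    rw [pvA_fold sample nc m m (le_refl _), Nat.sub_self]
    simp
  · rw [PySem.List.pyRange_one_eq_nil (show np ≤ 0 by omega)]
    simp only [List.foldl_nil]
    have h0 : np.toNat = 0 := by omega
    rw [h0]
    simp

-- ---- characterisation of the index ----
lemma pvRange_nodup (a b : Int) : (PySem.List.pyRange a b 1).Nodup :=
  (PySem.List.pairwise_lt_pyRange_one a b).imp (fun h => ne_of_lt h)

lemma pvKeyRow_nodup (i nc : Int) (hi : 0 ≤ i) :
    ((PySem.List.pyRange 0 nc 1).map (fun c => pvKey i c)).Nodup := by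
  refine (pvRange_nodup 0 nc).map_on ?_
  intro c1 h1 c2 h2 hk
  exact (pvKey_inj hi (PySem.List.mem_pyRange_one.mp h1).1 hi
    (PySem.List.mem_pyRange_one.mp h2).1 hk).2

lemma pvMem_pvPairs {np nc : Int} {p : String × (Int × Int)} :
    p ∈ pvPairs np nc ↔
      (0 ≤ p.2.1 ∧ p.2.1 < np ∧ 0 ≤ p.2.2 ∧ p.2.2 < nc ∧ p.1 = pvKey p.2.1 p.2.2) := by
  unfold pvPairs
  rw [List.mem_flatMap]
  constructor
  · rintro ⟨i, hi, hp⟩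
    rw [List.mem_map] at hp
    obtain ⟨c, hc, hpc⟩ := hp
    obtain ⟨hi1, hi2⟩ := PySem.List.mem_pyRange_one.mp hi
    obtain ⟨hc1, hc2⟩ := PySem.List.mem_pyRange_one.mp hc
    subst hpc
    exact ⟨hi1, hi2, hc1, hc2, rfl⟩
  · obtain ⟨k, i, c⟩ := p
    rintro ⟨h1, h2, h3, h4, h5⟩
    refine ⟨i, PySem.List.mem_pyRange_one.mpr ⟨h1, h2⟩, ?_⟩
    rw [List.mem_map]
    exact ⟨c, PySem.List.mem_pyRange_one.mpr ⟨h3, h4⟩, by simp only [] at h5; rw [h5]⟩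

lemma pvIndex_items (np nc : Int) : (pvIndex np nc).items = pvPairs np nc := rfl

lemma pvIndex_keys_nodup (np nc : Int) : (pvIndex np nc).keys.Nodup := by
  have hkeys : (pvIndex np nc).keys = (pvPairs np nc).map Prod.fst := rfl
  rw [hkeys]
  unfold pvPairs
  rw [List.map_flatMap]
  simp only [List.map_map]
  rw [List.nodup_flatMap]
  constructor
  · intro i hi
    exact pvKeyRow_nodup i nc (PySem.List.mem_pyRange_one.mp hi).1
  · refine List.Pairwise.imp_of_mem ?_ (PySem.List.pairwise_lt_pyRange_one 0 np)
    intro i i' hi hi' hlt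
    intro k hk hk'
    simp only [List.mem_map] at hk hk'
    obtain ⟨c, hc, rfl⟩ := hk
    obtain ⟨c', hc', he⟩ := hk'
    have := (pvKey_inj (PySem.List.mem_pyRange_one.mp hi').1
      (PySem.List.mem_pyRange_one.mp hc').1
      (PySem.List.mem_pyRange_one.mp hi).1
      (PySem.List.mem_pyRange_one.mp hc).1 he).1
    omega

lemma pvIndex_get? (np nc : Int) (k : String) (i c : Int) :
    (pvIndex np nc).get? k = some (i, c) ↔
      (0 ≤ i ∧ i < np ∧ 0 ≤ c ∧ c < nc ∧ k = pvKey i c) := by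
  rw [PySem.Dict.get?_eq_some_iff_mem_items _ _ _ (pvIndex_keys_nodup np nc), pvIndex_items]
  have := @pvMem_pvPairs np nc (k, (i, c))
  simpa using this

-- ---- characterisation of B ----
def pvUpd (b c : Int) : Int := if b == -1 || c < b then c else b

def pvAcc (np nc : Int) (entries : List (String × Int)) (j : Int) : List Int :=
  entries.filterMap (fun (kv : String × Int) => (
    if kv.2 == 1 then
      match (pvIndex np nc).get? kv.1 with
      | some (i, c) => if i = j then some c else none
      | none => none
    else none : Option Int))

lemma pvAcc_append (np nc : Int) (pre : List (String × Int)) (kv : String × Int) (j : Int) :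
    pvAcc np nc (pre ++ [kv]) j = pvAcc np nc pre j ++ pvAcc np nc [kv] j := by
  unfold pvAcc; rw [List.filterMap_append]

lemma pvB_fold (np nc : Int) (n : Nat) (hn : n = np.toNat) :
    ∀ (pre : List (String × Int)),
      pre.foldl (pvStepB (pvIndex np nc)) (List.replicate n (-1))
        = (List.range n).map
            (fun j : Nat => (pvAcc np nc pre (j : Int)).foldl pvUpd (-1)) := by
  intro pre
  induction pre using List.reverseRecOn with
  | nil =>
    apply List.ext_getElem (by simp)
    intro m h1 h2
    simp [pvAcc]
  | append_singleton pre kv ih =>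
    rw [List.foldl_append, List.foldl_cons, List.foldl_nil, ih]
    by_cases h1 : (kv.2 == 1) = true
    · cases h2 : (pvIndex np nc).get? kv.1 with
      | none =>
        have hB : ∀ y, pvStepB (pvIndex np nc) y kv = y := by
          intro y; simp [pvStepB, h1, h2]
        rw [hB]
        apply List.map_congr_left
        intro j _
        rw [pvAcc_append]
        have he : pvAcc np nc [kv] (j : Int) = [] := by
          unfold pvAcc
          simp only [List.filterMap_cons, List.filterMap_nil, h1, if_pos, h2]
        rw [he, List.append_nil]
      | some p =>
        obtain ⟨i, c⟩ := p
        obtain ⟨hi0, hinp, hc0, hcnc, hk⟩ := (pvIndex_get? np nc kv.1 i c).mp h2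
        have hB : ∀ y, pvStepB (pvIndex np nc) y kv =
            if (PySem.List.pyGetD y i 0 == -1 || decide (c < PySem.List.pyGetD y i 0)) = true then
              PySem.List.pySetD y i c
            else y := by
          intro y; simp [pvStepB, h1, h2]
        rw [hB]
        have hilt : i.toNat < n := by omega
        have hicast : i = (i.toNat : Int) := by omega
        have hget : PySem.List.pyGetD
            ((List.range n).map (fun j : Nat => (pvAcc np nc pre (j : Int)).foldl pvUpd (-1))) i 0
            = (pvAcc np nc pre (i : Int)).foldl pvUpd (-1) := by
          rw [hicast, PySem.List.pyGetD_natCast]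
          rw [List.getD_eq_getElem?_getD, List.getElem?_map, List.getElem?_range hilt]
          simp
        set v := (pvAcc np nc pre (i : Int)).foldl pvUpd (-1) with hv
        rw [hget]
        have hstep : ∀ j : Nat, pvAcc np nc (pre ++ [kv]) (j : Int)
            = pvAcc np nc pre (j : Int) ++ (if i = (j : Int) then [c] else []) := by
          intro j
          rw [pvAcc_append]
          congr 1
          unfold pvAcc
          simp only [List.filterMap_cons, List.filterMap_nil, h1, if_pos, h2]
          by_cases hij : i = (j : Int)
          · simp [hij]
          · simp [hij]
        by_cases hguard : (v == -1 || decide (c < v)) = true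
        · rw [if_pos hguard]
          rw [hicast, PySem.List.pySetD_natCast]
          apply List.ext_getElem (by simp)
          intro m hm1 hm2
          rw [List.getElem_set]
          simp only [List.getElem_map, List.getElem_range]
          have hmn : m < n := by simpa using hm2
          rw [hstep m]
          by_cases hmi : m = i.toNat
          · subst hmi
            rw [if_pos rfl, if_pos (by omega), List.foldl_append, List.foldl_cons, List.foldl_nil]
            rw [← hicast, ← hv]
            unfold pvUpd
            rw [if_pos hguard]
          · rw [if_neg (fun h => hmi h.symm), if_neg (show ¬ i = (m : Int) by omega), List.append_nil]
        · rw [if_neg hguard]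
          apply List.map_congr_left
          intro j _
          rw [hstep j]
          by_cases hij : i = (j : Int)
          · rw [if_pos hij, List.foldl_append, List.foldl_cons, List.foldl_nil]
            rw [← hij, ← hv]
            unfold pvUpd
            rw [if_neg hguard]
          · rw [if_neg hij, List.append_nil]
    · have hB : ∀ y, pvStepB (pvIndex np nc) y kv = y := by
        intro y; simp [pvStepB, h1]
      rw [hB]
      apply List.map_congr_left
      intro j _
      rw [pvAcc_append]
      have he : pvAcc np nc [kv] (j : Int) = [] := by
        unfold pvAcc
        simp only [List.filterMap_cons, List.filterMap_nil, h1, Bool.false_eq_true, if_false]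
      rw [he, List.append_nil]

lemma pvB_char (sample : List (String × Int)) (np nc : Int) :
    get_labels_from_sample_alt sample np nc =
      (List.range np.toNat).map
        (fun j : Nat => (pvAcc np nc sample (j : Int)).foldl pvUpd (-1)) := by
  unfold get_labels_from_sample_alt
  exact pvB_fold np nc np.toNat rfl sample

-- ---- pointwise agreement ----
lemma pvGetD_mk_eq_one {sample : List (String × Int)} (hnd : (sample.map Prod.fst).Nodup)
    (k : String) : (PySem.Dict.mk sample).getD k 0 = 1 ↔ (k, (1 : Int)) ∈ sample := by
  have hnd' : (PySem.Dict.mk sample).keys.Nodup := hnd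
  constructor
  · intro h
    rw [PySem.Dict.getD_eq_get?_getD] at h
    cases hq : (PySem.Dict.mk sample).get? k with
    | none => rw [hq] at h; simp at h
    | some v =>
      rw [hq] at h
      simp at h
      subst h
      exact PySem.Dict.mem_items_of_get?_eq_some _ hq
  · intro h
    have := PySem.Dict.get?_of_mem_items (d := PySem.Dict.mk sample) h hnd'
    rw [PySem.Dict.getD_eq_get?_getD, this]
    rfl

lemma pvMinFold (L : List Int) (hpos : ∀ c ∈ L, 0 ≤ c) (hne : L ≠ []) :
    L.foldl pvUpd (-1) ∈ L ∧ ∀ c ∈ L, L.foldl pvUpd (-1) ≤ c := by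
  induction L using List.reverseRecOn with
  | nil => exact absurd rfl hne
  | append_singleton pre c ih =>
    rw [List.foldl_append, List.foldl_cons, List.foldl_nil]
    by_cases hp : pre = []
    · subst hp
      simp only [List.foldl_nil]
      have : pvUpd (-1) c = c := by unfold pvUpd; simp
      rw [this]
      exact ⟨by simp, by intro x hx; simp at hx; omega⟩
    · obtain ⟨hmem, hmin⟩ := ih (fun x hx => hpos x (List.mem_append_left _ hx)) hp
      set v := pre.foldl pvUpd (-1) with hv
      have hv0 : 0 ≤ v := hpos v (List.mem_append_left _ hmem)
      have hne1 : (v == -1) = false := by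
        rw [beq_eq_false_iff_ne]
        omega
      unfold pvUpd
      rw [hne1]
      simp only [Bool.false_or]
      by_cases hc : c < v
      · rw [if_pos (by simpa using hc)]
        constructor
        · exact List.mem_append_right _ (by simp)
        · intro x hx
          rcases List.mem_append.mp hx with hx | hx
          · have := hmin x hx; omega
          · simp at hx; omega
      · rw [if_neg (by simpa using hc)]
        constructor
        · exact List.mem_append_left _ hmem
        · intro x hx
          rcases List.mem_append.mp hx with hx | hx
          · exact hmin x hx
          · simp at hx; omega

lemma pvFind?_min {p : Int → Bool} {l : List Int} {b : Int} (hsort : l.Pairwise (· < ·))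
    (hf : l.find? p = some b) : ∀ x ∈ l, p x → b ≤ x := by
  induction l with
  | nil => simp at hf
  | cons a t ih =>
    rcases List.pairwise_cons.mp hsort with ⟨hlt, ht⟩
    by_cases ha : p a
    · rw [List.find?_cons_of_pos ha] at hf
      obtain rfl : a = b := by simpa using hf
      intro x hx _
      rcases List.mem_cons.mp hx with rfl | hx
      · exact le_refl _
      · exact le_of_lt (hlt x hx)
    · rw [List.find?_cons_of_neg ha] at hf
      intro x hx hpx
      rcases List.mem_cons.mp hx with rfl | hx
      · exact absurd hpx ha
      · exact ih ht hf x hx hpx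

lemma pvMem_acc {sample : List (String × Int)} {np nc : Int} {j : Nat} {c : Int}
    (hj : (j : Int) < np) :
    c ∈ pvAcc np nc sample (j : Int) ↔
      (0 ≤ c ∧ c < nc ∧ (pvKey (j : Int) c, (1 : Int)) ∈ sample) := by
  unfold pvAcc
  rw [List.mem_filterMap]
  constructor
  · rintro ⟨kv, hkv, hsome⟩
    by_cases h1 : (kv.2 == 1) = true
    · rw [if_pos h1] at hsome
      cases hq : (pvIndex np nc).get? kv.1 with
      | none => rw [hq] at hsome; simp at hsome
      | some p =>
        obtain ⟨i', c'⟩ := p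
        rw [hq] at hsome
        have hsome2 : (if i' = (j : Int) then some c' else none) = some c := hsome
        by_cases hij : i' = (j : Int)
        · rw [if_pos hij] at hsome2
          have hcc : c' = c := by simpa using hsome2
          obtain ⟨hi0, hinp, hc0, hcnc, hk⟩ := (pvIndex_get? np nc kv.1 i' c').mp hq
          refine ⟨hcc ▸ hc0, hcc ▸ hcnc, ?_⟩
          have hkv1 : kv.1 = pvKey (j : Int) c := by rw [hk, hij, hcc]
          have hkv2 : kv.2 = 1 := by simpa using h1
          have hkveq : kv = (pvKey (j : Int) c, (1 : Int)) := Prod.ext hkv1 hkv2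
          rwa [← hkveq]
        · rw [if_neg hij] at hsome2; simp at hsome2
    · rw [if_neg h1] at hsome; simp at hsome
  · rintro ⟨h1, h2, h3⟩
    refine ⟨(pvKey (j : Int) c, (1 : Int)), h3, ?_⟩
    have hq : (pvIndex np nc).get? (pvKey (j : Int) c) = some ((j : Int), c) :=
      (pvIndex_get? np nc _ _ _).mpr ⟨by positivity, hj, h1, h2, rfl⟩
    show (if ((1 : Int) == 1) = true then
            match (pvIndex np nc).get? (pvKey (j : Int) c) with
            | some (i, c') => if i = (j : Int) then some c' else none
            | none => none
          else none) = some c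
    rw [if_pos (by decide), hq]
    show (if (j : Int) = (j : Int) then some c else none) = some c
    rw [if_pos rfl]

lemma pvPointwise (sample : List (String × Int)) (np nc : Int)
    (hnd : (sample.map Prod.fst).Nodup) (j : Nat) (hj : (j : Int) < np) :
    pvLabel sample nc (j : Int) = (pvAcc np nc sample (j : Int)).foldl pvUpd (-1) := by
  set L := pvAcc np nc sample (j : Int) with hL
  have hLmem : ∀ c ∈ L, 0 ≤ c ∧ c < nc ∧ (pvKey (j : Int) c, (1 : Int)) ∈ sample :=
    fun c hc => (pvMem_acc hj).mp hc
  cases hf : (PySem.List.pyRange 0 nc 1).find?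
      (fun c => (PySem.Dict.mk sample).getD (pvKey (j : Int) c) 0 == 1) with
  | none =>
    rw [pvLabel_none hf]
    have hnone := List.find?_eq_none.mp hf
    have hLnil : L = [] := by
      rw [List.eq_nil_iff_forall_not_mem]
      intro c hc
      obtain ⟨h1, h2, h3⟩ := hLmem c hc
      refine hnone c (PySem.List.mem_pyRange_one.mpr ⟨h1, h2⟩) ?_
      simp only [beq_iff_eq]
      exact (pvGetD_mk_eq_one hnd _).mpr h3
    rw [hLnil]
    rfl
  | some c0 =>
    rw [pvLabel_some hf]
    have hp0 := List.find?_some hf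
    have hc0r := PySem.List.mem_pyRange_one.mp (List.mem_of_find?_eq_some hf)
    have hc0L : c0 ∈ L := by
      rw [hL, pvMem_acc hj]
      exact ⟨hc0r.1, hc0r.2, (pvGetD_mk_eq_one hnd _).mp (by simpa using hp0)⟩
    have hLne : L ≠ [] := fun h => by rw [h] at hc0L; simp at hc0L
    obtain ⟨hmem, hmin⟩ := pvMinFold L (fun c hc => (hLmem c hc).1) hLne
    set m := L.foldl pvUpd (-1) with hm
    obtain ⟨hm1, hm2, hm3⟩ := hLmem m hmem
    have hmc0 : c0 ≤ m := by
      refine pvFind?_min (PySem.List.pairwise_lt_pyRange_one 0 nc) hf m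
        (PySem.List.mem_pyRange_one.mpr ⟨hm1, hm2⟩) ?_
      simp only [beq_iff_eq]
      exact (pvGetD_mk_eq_one hnd _).mpr hm3
    have hmle : m ≤ c0 := hmin c0 hc0L
    omega

-- ===== VERDICT (by name: the statement is the Claim_ definition above) =====
theorem get_labels_from_sample_spec : Claim_equal_get_labels_from_sample := by
  intro sample np nc _hdom hpre
  unfold Spec_get_labels_from_sample
  rw [pvA_char, pvB_char]
  apply List.map_congr_left
  intro k hk
  rw [List.mem_range] at hk
  exact pvPointwise sample np nc hpre k (by omega)
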